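-- pv_equiv track=rewrite | github.com/FunWheelDrive/CoinBot1.2 | main.py | group_trades_by_date
-- ===== SOURCE A (Python) =====
-- from collections import defaultdict
--
-- def group_trades_by_date(trade_log):
--     trades_by_date = defaultdict(list)
--     for log in trade_log:
--         ts = log.get('timestamp')
--         if ts:
--             date_str = ts.split()[0]
--             trades_by_date[date_str].append(log)
--     return dict(sorted(trades_by_date.items(), reverse=True))
-- ===== SOURCE B (Python) =====
-- def group_trades_by_date(trade_log):
--     # sort-then-coalesce: key every kept log by its date, stable-sort descending,
--     # then sweep once, coalescing consecutive runs of equal dates.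
--     keyed = [(log['timestamp'].split()[0], log) for log in trade_log if log.get('timestamp')]
--     keyed.sort(key=lambda p: p[0], reverse=True)
--     out = {}
--     i, n = 0, len(keyed)
--     while i < n:
--         date = keyed[i][0]
--         j = i
--         while j < n and keyed[j][0] == date:
--             j += 1
--         out[date] = [log for _, log in keyed[i:j]]
--         i = j
--     return out
-- ===== Notes on version B (the rewrite author's own statement) =====
-- stated objective: alternative
-- what changed: B replaces A's defaultdict hash-bucketing followed by sorting the buckets with a sort-then-coalesce pass: it keys each kept log by its date, stable-sorts the keyed list descending, and sweeps it once, coalescing consecutive runs of equal dates.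
import Mathlib
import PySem

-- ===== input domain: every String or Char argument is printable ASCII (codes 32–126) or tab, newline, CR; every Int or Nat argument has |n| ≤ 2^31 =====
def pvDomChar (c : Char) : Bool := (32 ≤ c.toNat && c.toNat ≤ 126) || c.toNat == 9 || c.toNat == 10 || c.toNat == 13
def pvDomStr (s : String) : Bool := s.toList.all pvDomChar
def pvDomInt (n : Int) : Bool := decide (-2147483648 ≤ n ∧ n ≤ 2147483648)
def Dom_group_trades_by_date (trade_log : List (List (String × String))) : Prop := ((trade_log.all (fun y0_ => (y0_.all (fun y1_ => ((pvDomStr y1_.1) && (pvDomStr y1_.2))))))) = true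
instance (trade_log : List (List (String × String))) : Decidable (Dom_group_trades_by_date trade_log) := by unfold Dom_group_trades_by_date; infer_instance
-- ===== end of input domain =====

-- B replaces A's defaultdict-bucketing-then-sort with a single stable descending
-- sort of date-keyed logs followed by one coalescing sweep over equal-date runs
-- (objective: alternative; same asymptotic cost).


-- ===== PORT A =====
-- A: bucket logs by date into a defaultdict(list), then 'dict(sorted(items, reverse=True))'.
-- sorted(items, reverse=True) compares (str, list) tuples; dict keys are distinct, so the
-- comparison is decided by the string key alone — ported as a key-sort on the first component.
-- 'ts.split()[0]' raises IndexError when ts is truthy but all-whitespace; there the port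
-- skips the log (excluded by Pre_).
def group_trades_by_date (trade_log : List (List (String × String))) : List (String × List (List (String × String))) :=
  let d : PySem.Dict String (List (List (String × String))) :=
    trade_log.foldl (fun d log =>
      match (PySem.Dict.mk log).get? "timestamp" with
      | none => d
      | some ts =>
        if ts = "" then d
        else
          match PySem.List.pyGet? (PySem.Str.split₀ ts) 0 with
          | none => d
          | some date => d.modify date [] (fun l => l ++ [log]))
      PySem.Dict.empty
  PySem.List.sorted d.items (fun p => p.1) true

-- ===== PORT B =====
-- the comprehension '[(log['timestamp'].split()[0], log) for log in trade_log if log.get('timestamp')]'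
-- (at the IndexError input the port skips the log; excluded by Pre_)
def pvKeyed (trade_log : List (List (String × String))) : List (String × List (String × String)) :=
  trade_log.filterMap (fun log =>
    match (PySem.Dict.mk log).get? "timestamp" with
    | none => none
    | some ts =>
      if ts = "" then none
      else
        match PySem.List.pyGet? (PySem.Str.split₀ ts) 0 with
        | none => none
        | some date => some (date, log))

-- the while-loop sweep of Source B: take the maximal run keyed[i:j] of the current date, emit it, continue at j
def pvCoalesce : List (String × List (String × String)) → List (String × List (List (String × String)))
  | [] => []
  | (k, v) :: rest =>
      (k, ((k, v) :: rest.takeWhile (fun q => q.1 == k)).map (fun q => q.2)) ::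
        pvCoalesce (rest.dropWhile (fun q => q.1 == k))
  termination_by ls => ls.length
  decreasing_by simpa using Nat.lt_succ_of_le (List.length_dropWhile_le _ _)

def group_trades_by_date_alt (trade_log : List (List (String × String))) : List (String × List (List (String × String))) :=
  pvCoalesce (PySem.List.sorted (pvKeyed trade_log) (fun p => p.1) true)

-- ===== PRECONDITION & SPEC =====
-- Pre_ excludes exactly the inputs where the Python raises IndexError: a log whose
-- 'timestamp' is a nonempty but all-whitespace string, so that its split has no word to index;
-- Python B raises there too.
def Pre_group_trades_by_date (trade_log : List (List (String × String))) : Prop :=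
  (trade_log.all (fun log =>
    ((PySem.Dict.mk log).get? "timestamp").elim true
      (fun ts => ts == "" || !(PySem.Str.split₀ ts).isEmpty))) = true
instance (trade_log : List (List (String × String))) : Decidable (Pre_group_trades_by_date trade_log) := by unfold Pre_group_trades_by_date; infer_instance
def pvWitness_group_trades_by_date : (List (List (String × String))) :=
  [[("timestamp", "2024-01-02 10:00"), ("pair", "BTC")],
   [("timestamp", "2024-01-01 09:00")],
   [("note", "no ts")]]
def Spec_group_trades_by_date (trade_log : List (List (String × String))) (out : List (String × List (List (String × String)))) : Prop := out = group_trades_by_date_alt trade_log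
instance (trade_log : List (List (String × String))) (out : List (String × List (List (String × String)))) : Decidable (Spec_group_trades_by_date trade_log out) := by unfold Spec_group_trades_by_date; infer_instance

-- ===== CLAIM (what is proved, stated in full; the proofs are below) =====
def Claim_equal_group_trades_by_date : Prop := ∀ (trade_log : List (List (String × String))), Dom_group_trades_by_date trade_log → Pre_group_trades_by_date trade_log → Spec_group_trades_by_date trade_log (group_trades_by_date trade_log)

-- ===== LEMMAS AND PROOFS =====

-- A's loop over trade_log is the grouping loop over the keyed list
theorem pv_foldlA (trade_log : List (List (String × String))) :
    ∀ d : PySem.Dict String (List (List (String × String))),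
      trade_log.foldl (fun d log =>
        match (PySem.Dict.mk log).get? "timestamp" with
        | none => d
        | some ts =>
          if ts = "" then d
          else
            match PySem.List.pyGet? (PySem.Str.split₀ ts) 0 with
            | none => d
            | some date => d.modify date [] (fun l => l ++ [log])) d
      = (pvKeyed trade_log).foldl (fun d p => d.modify p.1 [] (fun x => x ++ [p.2])) d := by
  induction trade_log with
  | nil => intro d; rfl
  | cons log rest ih =>
    intro d
    simp only [pvKeyed, List.filterMap_cons, List.foldl_cons] at *
    cases hg : (PySem.Dict.mk log).get? "timestamp" with
    | none => simpa [hg] using ih d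
    | some ts =>
      by_cases hts : ts = ""
      · simpa [hg, hts] using ih d
      · cases hh : PySem.List.pyGet? (PySem.Str.split₀ ts) 0 with
        | none => simpa [hg, hts, hh] using ih d
        | some date => simpa [hg, hts, hh] using ih _

-- stability of the descending key-sort: filtering to one key recovers the original sublist
theorem pv_pairwise_insertBy (x : String × List (String × String))
    (ys : List (String × List (String × String)))
    (h : ys.Pairwise (fun a b => b.1 ≤ a.1)) :
    (PySem.List.insertBy (fun a b => decide (b.1 < a.1)) x ys).Pairwise (fun a b => b.1 ≤ a.1) := by
  
  induction ys with
  | nil => simp [PySem.List.insertBy]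
  | cons y ys ih =>
    rw [List.pairwise_cons] at h
    obtain ⟨hy, hys⟩ := h
    by_cases hcmp : y.1 < x.1
    · simp only [PySem.List.insertBy, hcmp, decide_true, if_pos]
      refine List.pairwise_cons.2 ⟨?_, List.pairwise_cons.2 ⟨hy, hys⟩⟩
      intro z hz
      rcases List.mem_cons.mp hz with rfl | hz'
      · exact le_of_lt hcmp
      · exact le_trans (hy z hz') (le_of_lt hcmp)
    · simp only [PySem.List.insertBy, hcmp, decide_false, if_neg, Bool.false_eq_true,
        not_false_iff]
      refine List.pairwise_cons.2 ⟨?_, ih hys⟩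
      intro z hz
      rcases (PySem.List.mem_insertBy _ _ _ _).mp hz with rfl | hz'
      · exact le_of_not_gt hcmp
      · exact hy z hz'


theorem pv_filter_insertBy (x : String × List (String × String))
    (ys : List (String × List (String × String))) (k : String)
    (h : ys.Pairwise (fun a b => b.1 ≤ a.1)) :
    (PySem.List.insertBy (fun a b => decide (b.1 < a.1)) x ys).filter (fun p => p.1 == k)
      = if x.1 == k then ys.filter (fun p => p.1 == k) ++ [x] else ys.filter (fun p => p.1 == k) := by
  
  induction ys with
  | nil =>
    by_cases hx : x.1 == k <;> simp [PySem.List.insertBy, List.filter, hx]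
  | cons y ys ih =>
    rw [List.pairwise_cons] at h
    obtain ⟨hy, hys⟩ := h
    by_cases hcmp : y.1 < x.1
    · simp only [PySem.List.insertBy, hcmp, decide_true, if_pos]
      by_cases hx : x.1 == k
      · have hxk : x.1 = k := by simpa using hx
        have hnil : (y :: ys).filter (fun p => p.1 == k) = [] := by
          rw [List.filter_eq_nil_iff]
          intro q hq
          have hqle : q.1 ≤ y.1 := by
            rcases List.mem_cons.mp hq with rfl | hq'
            · exact le_refl _
            · exact hy q hq'
          have : q.1 < k := lt_of_le_of_lt hqle (hxk ▸ hcmp)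
          simp [ne_of_lt this]
        rw [List.filter_cons]
        simp [hx, hnil]
      · simp [List.filter_cons, hx]
    · simp only [PySem.List.insertBy, hcmp, decide_false, if_neg, Bool.false_eq_true,
        not_false_iff]
      rw [List.filter_cons, List.filter_cons, ih hys]
      by_cases hyk : y.1 == k <;> by_cases hx : x.1 == k <;> simp [hyk, hx]


theorem pv_filter_foldl (xs : List (String × List (String × String))) (k : String) :
    ∀ acc : List (String × List (String × String)), acc.Pairwise (fun a b => b.1 ≤ a.1) →
      (xs.foldl (fun acc x => PySem.List.insertBy (fun a b => decide (b.1 < a.1)) x acc) acc).filter (fun p => p.1 == k)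
        = acc.filter (fun p => p.1 == k) ++ xs.filter (fun p => p.1 == k) := by
  
  induction xs with
  | nil => intro acc _; simp
  | cons x xs ih =>
    intro acc hacc
    rw [List.foldl_cons, ih _ (pv_pairwise_insertBy x acc hacc),
      pv_filter_insertBy x acc k hacc, List.filter_cons]
    by_cases hx : x.1 == k <;> simp [hx]


theorem pv_filter_sorted (xs : List (String × List (String × String))) (k : String) :
    (PySem.List.sorted xs (fun p => p.1) true).filter (fun p => p.1 == k)
      = xs.filter (fun p => p.1 == k) := by
  
  rw [PySem.List.sorted_rev_eq_foldl_insertBy]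
  simpa using pv_filter_foldl xs k [] List.Pairwise.nil


-- everything after the first non-matching element has a strictly smaller key
theorem pv_drop_lt (k : String) (rest : List (String × List (String × String)))
    (hle : ∀ q ∈ rest, q.1 ≤ k) (hpw : rest.Pairwise (fun a b => b.1 ≤ a.1)) :
    ∀ q ∈ rest.dropWhile (fun q => q.1 == k), q.1 < k := by
  
  induction rest with
  | nil => simp
  | cons r rs ih =>
    rw [List.pairwise_cons] at hpw
    rw [List.dropWhile_cons]
    by_cases hr : r.1 == k
    · rw [if_pos hr]
      exact ih (fun q hq => hle q (List.mem_cons_of_mem _ hq)) hpw.2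
    · rw [if_neg (by simpa using hr)]
      intro q hq
      have hrk : r.1 < k :=
        lt_of_le_of_ne (hle r List.mem_cons_self) (by simpa using hr)
      rcases List.mem_cons.mp hq with rfl | hq'
      · exact hrk
      · exact lt_of_le_of_lt (hpw.1 q hq') hrk


-- membership characterisation of the coalescing sweep on a descending list
theorem pv_coalesce_mem (ls : List (String × List (String × String)))
    (h : ls.Pairwise (fun a b => b.1 ≤ a.1)) (p : String × List (List (String × String))) :
    p ∈ pvCoalesce ls ↔
      p.1 ∈ ls.map Prod.fst ∧ p = (p.1, (ls.filter (fun q => q.1 == p.1)).map (fun q => q.2)) := by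
  
  induction ls using pvCoalesce.induct generalizing p with
  | case1 => simp [pvCoalesce]
  | case2 k v rest ih =>
    rw [List.pairwise_cons] at h
    obtain ⟨hk, hrest⟩ := h
    have hrun : ∀ q ∈ rest.takeWhile (fun q => q.1 == k), q.1 = k := by
      intro q hq
      have := List.mem_takeWhile_imp hq
      simpa using this
    have hlt : ∀ q ∈ rest.dropWhile (fun q => q.1 == k), q.1 < k :=
      pv_drop_lt k rest hk hrest
    have hpw' : (rest.dropWhile (fun q => q.1 == k)).Pairwise (fun a b => b.1 ≤ a.1) :=
      hrest.sublist (List.dropWhile_sublist _)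
    have hsplit : rest.takeWhile (fun q => q.1 == k) ++ rest.dropWhile (fun q => q.1 == k)
        = rest := List.takeWhile_append_dropWhile
    have hfk : ((k, v) :: rest).filter (fun q => q.1 == k)
        = (k, v) :: rest.takeWhile (fun q => q.1 == k) := by
      rw [List.filter_cons]
      have h1 : rest.filter (fun q => q.1 == k) = rest.takeWhile (fun q => q.1 == k) := by
        conv_lhs => rw [← hsplit]
        rw [List.filter_append, List.filter_eq_self.mpr (fun q hq => by simp [hrun q hq]),
          List.filter_eq_nil_iff.mpr (fun q hq => by simp [ne_of_lt (hlt q hq)])]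
        simp
      simp [h1]
    have hfc : ∀ c, c ≠ k → ((k, v) :: rest).filter (fun q => q.1 == c)
        = (rest.dropWhile (fun q => q.1 == k)).filter (fun q => q.1 == c) := by
      intro c hc
      rw [List.filter_cons]
      have h1 : rest.filter (fun q => q.1 == c)
          = (rest.dropWhile (fun q => q.1 == k)).filter (fun q => q.1 == c) := by
        conv_lhs => rw [← hsplit]
        rw [List.filter_append,
          List.filter_eq_nil_iff.mpr (fun q hq => by simp [hrun q hq, Ne.symm hc])]
        simp
      simp [h1, Ne.symm hc]
    rw [pvCoalesce]
    rw [List.mem_cons, ih hpw']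
    constructor
    · rintro (rfl | ⟨h1, h2⟩)
      · refine ⟨by simp, ?_⟩
        simp only
        rw [hfk]
      · obtain ⟨a, ha, hap⟩ := List.mem_map.mp h1
        have hane : p.1 < k := hap ▸ hlt a ha
        refine ⟨?_, ?_⟩
        · have : a ∈ rest := (List.dropWhile_sublist _).subset ha
          exact List.mem_map.mpr ⟨a, List.mem_cons_of_mem _ this, hap⟩
        · rw [hfc p.1 (ne_of_lt hane)]
          exact h2
    · rintro ⟨h1, h2⟩
      by_cases hpk : p.1 = k
      · left
        rw [h2, hpk, hfk]
      · right
        refine ⟨?_, ?_⟩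
        · rcases List.mem_map.mp h1 with ⟨a, ha, hap⟩
          rcases List.mem_cons.mp ha with rfl | ha'
          · exact absurd hap.symm (by simpa using hpk)
          · have : a ∈ rest.takeWhile (fun q => q.1 == k)
                ∨ a ∈ rest.dropWhile (fun q => q.1 == k) := by
              rw [← List.mem_append, hsplit]; exact ha'
            rcases this with h | h
            · exact absurd (hap ▸ hrun a h : p.1 = k) hpk
            · exact List.mem_map.mpr ⟨a, h, hap⟩
        · rw [hfc p.1 hpk] at h2
          exact h2


theorem pv_coalesce_pairwise (ls : List (String × List (String × String)))
    (h : ls.Pairwise (fun a b => b.1 ≤ a.1)) :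
    (pvCoalesce ls).Pairwise (fun a b => b.1 < a.1) := by
  
  induction ls using pvCoalesce.induct with
  | case1 => simp [pvCoalesce]
  | case2 k v rest ih =>
    rw [List.pairwise_cons] at h
    obtain ⟨hk, hrest⟩ := h
    have hlt : ∀ q ∈ rest.dropWhile (fun q => q.1 == k), q.1 < k :=
      pv_drop_lt k rest hk hrest
    have hpw' : (rest.dropWhile (fun q => q.1 == k)).Pairwise (fun a b => b.1 ≤ a.1) :=
      hrest.sublist (List.dropWhile_sublist _)
    rw [pvCoalesce]
    refine List.pairwise_cons.2 ⟨?_, ih hpw'⟩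
    intro z hz
    have := (pv_coalesce_mem _ hpw' z).mp hz
    obtain ⟨a, ha, hap⟩ := List.mem_map.mp this.1
    exact hap ▸ hlt a ha


-- the central identity: a descending key-sort of per-key groups is the coalesced sorted list
theorem pv_main (xs : List (String × List (String × String))) (Kd : List String)
    (hnd : Kd.Nodup) (hmem : ∀ c, c ∈ Kd ↔ c ∈ xs.map Prod.fst) :
    PySem.List.sorted (Kd.map (fun c => (c, (xs.filter (fun q => q.1 == c)).map (fun q => q.2)))) (fun p => p.1) true
      = pvCoalesce (PySem.List.sorted xs (fun p => p.1) true) := by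
  
  have hS : (PySem.List.sorted xs (fun p => p.1) true).Pairwise (fun a b => b.1 ≤ a.1) := by
    simpa using PySem.List.sorted_pairwise_rev xs (fun p => p.1)
  have hmemS : ∀ c, c ∈ (PySem.List.sorted xs (fun p => p.1) true).map Prod.fst
      ↔ c ∈ xs.map Prod.fst := fun c =>
    ((PySem.List.sorted_perm xs (fun p => p.1) true).map Prod.fst).mem_iff
  have hgt : (pvCoalesce (PySem.List.sorted xs (fun p => p.1) true)).Pairwise
      (fun a b => b.1 < a.1) := pv_coalesce_pairwise _ hS
  apply PySem.List.sorted_rev_eq_of_perm_of_pairwise_gt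
  · have n1 : (pvCoalesce (PySem.List.sorted xs (fun p => p.1) true)).Nodup :=
      hgt.imp (fun {a b} hlt heq => absurd (heq ▸ hlt) (lt_irrefl _))
    have n2 : (Kd.map (fun c => (c, (xs.filter (fun q => q.1 == c)).map (fun q => q.2)))).Nodup :=
      hnd.map (fun a b hab => congrArg Prod.fst hab)
    rw [List.perm_ext_iff_of_nodup n1 n2]
    intro p
    rw [pv_coalesce_mem _ hS p]
    constructor
    · rintro ⟨h1, h2⟩
      refine List.mem_map.mpr ⟨p.1, (hmem p.1).mpr ((hmemS p.1).mp h1), ?_⟩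
      rw [pv_filter_sorted xs p.1] at h2
      exact h2.symm
    · intro hp
      obtain ⟨c, hc, rfl⟩ := List.mem_map.mp hp
      refine ⟨(hmemS c).mpr ((hmem c).mp hc), ?_⟩
      simp only
      rw [pv_filter_sorted xs c]
  · exact hgt


theorem group_trades_by_date_spec : Claim_equal_group_trades_by_date := by
  
  intro tl _ _
  unfold Spec_group_trades_by_date group_trades_by_date group_trades_by_date_alt
  rw [pv_foldlA tl PySem.Dict.empty]
  show PySem.List.sorted (List.foldl (fun d p => d.modify p.1 [] fun x => x ++ [p.2])
      PySem.Dict.empty (pvKeyed tl)).items (fun p => p.1) true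
    = pvCoalesce (PySem.List.sorted (pvKeyed tl) (fun p => p.1) true)
  have hkeys : ((pvKeyed tl).foldl (fun d p => d.modify p.1 [] (fun x => x ++ [p.2]))
      PySem.Dict.empty).keys = PySem.Set.update [] ((pvKeyed tl).map Prod.fst) := by
    simpa [PySem.Dict.keys_empty] using
      PySem.Dict.keys_foldl_modify_key (pvKeyed tl) Prod.fst []
        (fun _ p => fun x => x ++ [p.2]) PySem.Dict.empty
  have hnodup : ((pvKeyed tl).foldl (fun d p => d.modify p.1 [] (fun x => x ++ [p.2]))
      PySem.Dict.empty).keys.Nodup := by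
    apply PySem.Dict.nodup_keys_foldl_modify_key (pvKeyed tl) Prod.fst []
      (fun _ p => fun x => x ++ [p.2]) PySem.Dict.empty
    simp [PySem.Dict.keys_empty]
  have hgetD : ∀ c, ((pvKeyed tl).foldl (fun d p => d.modify p.1 [] (fun x => x ++ [p.2]))
      PySem.Dict.empty).getD c []
      = ((pvKeyed tl).filter (fun q => q.1 == c)).map (fun q => q.2) := by
    intro c
    simpa using PySem.Dict.getD_foldl_modify_append (pvKeyed tl) PySem.Dict.empty c
  rw [PySem.Dict.items_eq_map_keys _ hnodup []]
  rw [List.map_congr_left (fun c _ => by rw [hgetD c])]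
  apply pv_main _ _ hnodup
  intro c
  rw [hkeys]
  simp [PySem.Set.mem_update]
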